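-- pv_equiv track=rewrite | github.com/Yawn-Sean/Daily_CF_Problems | daily_problems/2025/08/0811/personal_submission/cf652c_liryc.py | solve
-- ===== SOURCE A (Python) =====
-- def solve(n: int, m: int, pa: list[int], foes: list[list[int]]) -> int:
--     g = [[] for _ in range(n + 1)]
--     for u, v in foes:
--         g[u].append(v)
--         g[v].append(u)
--     ans, i, cn = 0, 0, [0] * (n + 1)
--     for j, p in enumerate(pa):
--         while cn[p]:
--             for y in g[pa[i]]:
--                 cn[y] -= 1
--             i += 1
--         for x in g[p]:
--             cn[x] += 1
--         ans += j - i + 1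
--     return ans
-- ===== SOURCE B (Python) =====
-- def solve(n: int, m: int, pa: list[int], foes: list[list[int]]) -> int:
--     occ = [[] for _ in range(n + 1)]
--     for idx, v in enumerate(pa):
--         occ[v].append(idx)
--     limit = [0] * len(pa)
--     for u, v in foes:
--         for a, b in ((u, v), (v, u)):
--             for r in occ[b]:
--                 for q in occ[a]:
--                     if q < r and limit[r] < q + 1:
--                         limit[r] = q + 1
--     ans = 0
--     cur = 0
--     for j in range(len(pa)):
--         if cur < limit[j]:
--             cur = limit[j]
--         ans += j - cur + 1
--     return ans
-- ===== Notes on version B (the rewrite author's own statement) =====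
-- stated objective: alternative
-- what changed: Replaces the online two-pointer sweep (adjacency lists, per-value counter array, retreating i-pointer with a nested shrink loop) by a precomputed per-position left-bound table built from per-value occurrence lists (limit[r]=max(q+1) over foe co-occurrences q<r) followed by a single running-max pass adding j-cur+1; Pre_ is exactly the set of inputs where A returns normally (all values inside the size-(n+1) index range, foe entries of length 2).
import Mathlib
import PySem

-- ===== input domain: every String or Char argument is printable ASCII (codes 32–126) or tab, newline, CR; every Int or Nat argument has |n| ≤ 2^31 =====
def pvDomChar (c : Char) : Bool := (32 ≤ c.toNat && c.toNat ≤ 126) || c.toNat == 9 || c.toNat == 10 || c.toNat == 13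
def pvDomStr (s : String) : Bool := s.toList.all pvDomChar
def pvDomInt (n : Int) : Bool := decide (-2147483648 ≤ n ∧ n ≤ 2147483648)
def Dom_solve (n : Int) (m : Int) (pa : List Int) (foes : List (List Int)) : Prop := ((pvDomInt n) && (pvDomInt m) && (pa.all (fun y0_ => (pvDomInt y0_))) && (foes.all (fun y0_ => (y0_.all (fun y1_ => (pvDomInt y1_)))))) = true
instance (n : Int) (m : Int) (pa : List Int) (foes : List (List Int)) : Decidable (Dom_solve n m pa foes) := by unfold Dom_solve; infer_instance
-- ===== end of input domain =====

-- B replaces A's online two-pointer sweep (adjacency lists + per-cell counter + retreating i)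
-- by a precomputed per-position left-bound table (from per-cell occurrence lists) and one
-- running-max pass; equal to A on every input A returns on (Pre_ = exactly those inputs).

-- ===== PORT A =====
-- Python lists of size n+1 are ported as List with PySem.List.pyGetD/pySetD (exact Python
-- indexing incl. negative wraparound); the `while cn[p]:` loop is a fuel recursion whose fuel
-- len(pa) is never exhausted on Pre_ inputs (loop invariant in the proofs below).
def pvGStep (g : List (List Int)) (f : List Int) : List (List Int) :=
  match f with
  | [u, v] =>
    let g := PySem.List.pySetD g u (PySem.List.pyGetD g u [] ++ [v])
    PySem.List.pySetD g v (PySem.List.pyGetD g v [] ++ [u])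
  | _ => g

def pvCnSub (cn : List Int) (ys : List Int) : List Int :=
  ys.foldl (fun cn y => PySem.List.pySetD cn y (PySem.List.pyGetD cn y 0 - 1)) cn

def pvCnAdd (cn : List Int) (ys : List Int) : List Int :=
  ys.foldl (fun cn y => PySem.List.pySetD cn y (PySem.List.pyGetD cn y 0 + 1)) cn

def pvShrink (g : List (List Int)) (pa : List Int) (p : Int) :
    Nat → Int → List Int → Int × List Int
  | 0, i, cn => (i, cn)
  | fuel + 1, i, cn =>
    if PySem.List.pyGetD cn p 0 ≠ 0 then
      pvShrink g pa p fuel (i + 1)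
        (pvCnSub cn (PySem.List.pyGetD g (PySem.List.pyGetD pa i 0) []))
    else (i, cn)

def pvStepA (g : List (List Int)) (pa : List Int)
    (s : Int × Int × List Int) (jp : Int × Int) : Int × Int × List Int :=
  let r := pvShrink g pa jp.2 pa.length s.2.1 s.2.2
  (s.1 + jp.1 - r.1 + 1, r.1, pvCnAdd r.2 (PySem.List.pyGetD g jp.2 []))

def solve (n : Int) (m : Int) (pa : List Int) (foes : List (List Int)) : Int :=
  let g := foes.foldl pvGStep (List.replicate (n + 1).toNat [])
  ((PySem.List.enumerate pa 0).foldl (pvStepA g pa) (0, 0, List.replicate (n + 1).toNat 0)).1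

-- ===== PORT B =====
def pvOccStep (occ : List (List Int)) (iv : Int × Int) : List (List Int) :=
  PySem.List.pySetD occ iv.2 (PySem.List.pyGetD occ iv.2 [] ++ [iv.1])

def pvLimPair (occ : List (List Int)) (lim : List Int) (a b : Int) : List Int :=
  (PySem.List.pyGetD occ b []).foldl (fun lim r =>
    (PySem.List.pyGetD occ a []).foldl (fun lim q =>
      if q < r ∧ PySem.List.pyGetD lim r 0 < q + 1 then PySem.List.pySetD lim r (q + 1) else lim)
      lim) lim

def pvLimStep (occ : List (List Int)) (lim : List Int) (f : List Int) : List Int :=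
  match f with
  | [u, v] => [(u, v), (v, u)].foldl (fun lim ab => pvLimPair occ lim ab.1 ab.2) lim
  | _ => lim

def pvStepB (limit : List Int) (s : Int × Int) (j : Int) : Int × Int :=
  let cur := if s.2 < PySem.List.pyGetD limit j 0 then PySem.List.pyGetD limit j 0 else s.2
  (s.1 + j - cur + 1, cur)

def solve_alt (n : Int) (m : Int) (pa : List Int) (foes : List (List Int)) : Int :=
  let occ := (PySem.List.enumerate pa 0).foldl pvOccStep (List.replicate (n + 1).toNat [])
  let limit := foes.foldl (pvLimStep occ) (List.replicate pa.length 0)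
  ((PySem.List.pyRange 0 (PySem.List.len pa) 1).foldl (pvStepB limit) (0, 0)).1

-- ===== PRECONDITION & SPEC =====
-- Exactly the inputs on which Python A returns normally: every value indexes a list of size
-- n+1 without IndexError (Python range: -(n+1) ≤ v ≤ n) and every foe entry unpacks as a pair.
def Pre_solve (n : Int) (m : Int) (pa : List Int) (foes : List (List Int)) : Prop :=
  (∀ p ∈ pa, -(n + 1) ≤ p ∧ p ≤ n) ∧
    (∀ f ∈ foes, f.length = 2 ∧ ∀ x ∈ f, -(n + 1) ≤ x ∧ x ≤ n)

instance (n : Int) (m : Int) (pa : List Int) (foes : List (List Int)) :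
    Decidable (Pre_solve n m pa foes) := by unfold Pre_solve; infer_instance

def pvWitness_solve : Int × Int × List Int × List (List Int) := (2, 1, [1, 2], [[1, 2]])

def Spec_solve (n : Int) (m : Int) (pa : List Int) (foes : List (List Int)) (out : Int) : Prop :=
  out = solve_alt n m pa foes

instance (n : Int) (m : Int) (pa : List Int) (foes : List (List Int)) (out : Int) :
    Decidable (Spec_solve n m pa foes out) := by unfold Spec_solve; infer_instance

-- ===== CLAIM (what is proved, stated in full; the proofs are below) =====
def Claim_equal_solve : Prop := ∀ (n : Int) (m : Int) (pa : List Int) (foes : List (List Int)), Dom_solve n m pa foes → Pre_solve n m pa foes → Spec_solve n m pa foes (solve n m pa foes)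

-- ===== LEMMAS AND PROOFS =====

-- Python index resolution on a list of length N (negative = from the end)
def pvIdx (N : Nat) (v : Int) : Nat := if v < 0 then (v + N).toNat else v.toNat
def pvInR (N : Nat) (v : Int) : Prop := -(N : Int) ≤ v ∧ v < N

-- per-cell spec layer: cells are resolved indices 0 ≤ c < N, N = n+1
def pvCell (N : Nat) (pa : List Int) (t : Nat) : Nat := pvIdx N (pa.getD t 0)

def pvP (N : Nat) (f : List Int) (c c' : Nat) : Nat :=
  match f with
  | [u, v] => (if pvIdx N u = c ∧ pvIdx N v = c' then 1 else 0) +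
      (if pvIdx N v = c ∧ pvIdx N u = c' then 1 else 0)
  | _ => 0

def pvPE (N : Nat) (foes : List (List Int)) (c c' : Nat) : Nat :=
  (foes.map (fun f => pvP N f c c')).sum

def pvWinS (N : Nat) (pa : List Int) (foes : List (List Int)) (i j : Nat) (c : Nat) : Int :=
  ((List.range' i (j - i)).map
    (fun t => (pvPE N foes (pvCell N pa t) c : Int))).sum

def pvLS (N : Nat) (pa : List Int) (foes : List (List Int)) (j : Nat) : Int :=
  (List.range j).foldl
    (fun a t => if 0 < pvPE N foes (pvCell N pa t) (pvCell N pa j)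
                then max a ((t : Int) + 1) else a) 0

def pvINV (N : Nat) (pa : List Int) (foes : List (List Int)) (i j : Nat) (cn : List Int) : Prop :=
  cn.length = N ∧ ∀ c < N, cn.getD c 0 = pvWinS N pa foes i j c

def pvI (L : Nat → Int) : Nat → Int
  | 0 => 0
  | k + 1 => max (pvI L k) (L k)

def pvAns (L : Nat → Int) : Nat → Int
  | 0 => 0
  | k + 1 => pvAns L k + ((k : Int) - pvI L (k + 1) + 1)

def pvPosL (N : Nat) (pa : List Int) (c : Nat) : List Int :=
  ((List.range pa.length).filter (fun t => pvCell N pa t = c)).map (fun (t : Nat) => (t : Int))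

def pvOkPa (N : Nat) (pa : List Int) : Prop := ∀ p ∈ pa, pvInR N p
def pvOkFoes (N : Nat) (foes : List (List Int)) : Prop :=
  ∀ f ∈ foes, ∃ u v : Int, f = [u, v] ∧ pvInR N u ∧ pvInR N v

-- ---- index bridges ----
theorem pvIdx_lt {N : Nat} {v : Int} (h : pvInR N v) : pvIdx N v < N := by
  unfold pvIdx; unfold pvInR at h; split <;> omega

theorem pvGetD_idx {α : Type} (xs : List α) (v : Int) (d : α) (h : pvInR xs.length v) :
    PySem.List.pyGetD xs v d = xs.getD (pvIdx xs.length v) d := by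
  obtain ⟨h1, h2⟩ := h
  unfold PySem.List.pyGetD PySem.List.pyGet? PySem.List.pyIdx? pvIdx
  rw [List.getD_eq_getElem?_getD]
  split_ifs with a b c
  · exact absurd b (by omega)
  · simp only [Option.bind_some]
  · rw [show xs.length - (-v).toNat = (v + (xs.length : Int)).toNat by omega]
    simp only [Option.bind_some]
  · exact absurd (by omega : (0:Int) ≤ v) a

theorem pvSetD_idx {α : Type} (xs : List α) (v : Int) (x : α) (h : pvInR xs.length v) :
    PySem.List.pySetD xs v x = xs.set (pvIdx xs.length v) x := by
  obtain ⟨h1, h2⟩ := h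
  unfold PySem.List.pySetD PySem.List.pySet? PySem.List.pyIdx? pvIdx
  split_ifs with a b c
  · exact absurd b (by omega)
  · simp only [Option.map_some, Option.getD_some]
  · rw [show xs.length - (-v).toNat = (v + (xs.length : Int)).toNat by omega]
    simp only [Option.map_some, Option.getD_some]
  · exact absurd (by omega : (0:Int) ≤ v) a

theorem pvGetD_set {α : Type} (xs : List α) (i j : Nat) (v : α) (d : α) :
    (xs.set i v).getD j d = if j = i ∧ i < xs.length then v else xs.getD j d := by
  rcases Nat.lt_or_ge j xs.length with hj | hj
  · rw [List.getD_eq_getElem _ _ (by simpa using hj), List.getD_eq_getElem _ _ hj,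
      List.getElem_set]
    split_ifs with a b c
    · rfl
    · exact absurd ⟨a.symm, a ▸ hj⟩ b
    · exact absurd c.1.symm a
    · rfl
  · rw [List.getD_eq_default _ _ (by simpa using hj), List.getD_eq_default _ _ hj]
    split_ifs with a
    · omega
    · rfl

-- ---- adjacency characterisation (A side) ----
theorem pvG_char (fs : List (List Int)) : ∀ (g0 : List (List Int)),
    pvOkFoes g0.length fs → (∀ c < g0.length, ∀ y ∈ g0.getD c [], pvInR g0.length y) →
    (fs.foldl pvGStep g0).length = g0.length ∧
    (∀ c < g0.length, ∀ y ∈ (fs.foldl pvGStep g0).getD c [], pvInR g0.length y) ∧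
    ∀ c < g0.length, ∀ c' : Nat,
      (((fs.foldl pvGStep g0).getD c []).map (pvIdx g0.length)).count c' =
        ((g0.getD c []).map (pvIdx g0.length)).count c' +
          (fs.map (fun f => pvP g0.length f c c')).sum := by
  induction fs with
  | nil => intro g0 _ hv; exact ⟨rfl, hv, fun c _ c' => by simp⟩
  | cons f t ih =>
    intro g0 hok hv
    obtain ⟨u, v, rfl, hu, hv'⟩ := hok f (by simp)
    have hul : pvIdx g0.length u < g0.length := pvIdx_lt hu
    have hvl : pvIdx g0.length v < g0.length := pvIdx_lt hv'
    have hml : (g0.set (pvIdx g0.length u) (g0.getD (pvIdx g0.length u) [] ++ [v])).length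
        = g0.length := by simp
    have hstep : pvGStep g0 [u, v] =
        (g0.set (pvIdx g0.length u) (g0.getD (pvIdx g0.length u) [] ++ [v])).set
          (pvIdx g0.length v)
          (((g0.set (pvIdx g0.length u) (g0.getD (pvIdx g0.length u) [] ++ [v])).getD
            (pvIdx g0.length v) []) ++ [u]) := by
      show PySem.List.pySetD _ v _ = _
      rw [pvGetD_idx g0 u [] hu, pvSetD_idx g0 u _ hu,
        pvGetD_idx _ v [] (by rw [hml]; exact hv'), pvSetD_idx _ v _ (by rw [hml]; exact hv')]
      rw [hml]
    rw [List.foldl_cons, hstep]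
    have hl1 : ((g0.set (pvIdx g0.length u) (g0.getD (pvIdx g0.length u) [] ++ [v])).set
          (pvIdx g0.length v)
          (((g0.set (pvIdx g0.length u) (g0.getD (pvIdx g0.length u) [] ++ [v])).getD
            (pvIdx g0.length v) []) ++ [u])).length = g0.length := by simp
    have hval : ∀ c : Nat, ((g0.set (pvIdx g0.length u) (g0.getD (pvIdx g0.length u) [] ++ [v])).set
          (pvIdx g0.length v)
          (((g0.set (pvIdx g0.length u) (g0.getD (pvIdx g0.length u) [] ++ [v])).getD
            (pvIdx g0.length v) []) ++ [u])).getD c [] = (g0.getD c []) ++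
        (if c = pvIdx g0.length u then [v] else []) ++
        (if c = pvIdx g0.length v then [u] else []) := by
      intro c
      rw [pvGetD_set, pvGetD_set, pvGetD_set]
      simp only [List.length_set]
      by_cases hcv : c = pvIdx g0.length v <;> by_cases hcu : c = pvIdx g0.length u
      · rw [if_pos ⟨hcv, hvl⟩, if_pos ⟨hcv ▸ hcu ▸ rfl, hul⟩, if_pos hcu, if_pos hcv, hcu]
      · rw [if_pos ⟨hcv, hvl⟩, if_neg (by rw [← hcv]; tauto), if_neg hcu, if_pos hcv, hcv]
        simp
      · rw [if_neg (by tauto), if_pos ⟨hcu, hul⟩, if_pos hcu, if_neg hcv, hcu]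
        simp
      · rw [if_neg (by tauto), if_neg (by tauto), if_neg hcu, if_neg hcv]
        simp
    have hv1 : ∀ c < g0.length, ∀ y ∈ ((g0.set (pvIdx g0.length u)
          (g0.getD (pvIdx g0.length u) [] ++ [v])).set (pvIdx g0.length v)
          (((g0.set (pvIdx g0.length u) (g0.getD (pvIdx g0.length u) [] ++ [v])).getD
            (pvIdx g0.length v) []) ++ [u])).getD c [], pvInR g0.length y := by
      intro c hc y hy
      rw [hval c] at hy
      simp only [List.mem_append] at hy
      rcases hy with (hy | hy) | hy
      · exact hv c hc y hy
      · split at hy <;> simp_all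
      · split at hy <;> simp_all
    obtain ⟨ihl, ihv, ihc⟩ := ih _ (by rw [hl1]; intro f hf; exact hok f (by simp [hf]))
      (by rw [hl1]; exact hv1)
    rw [hl1] at ihl ihv ihc
    refine ⟨ihl, ihv, ?_⟩
    intro c hc c'
    rw [ihc c hc c', hval c]
    simp only [List.map_append, List.count_append, List.map_cons, List.sum_cons]
    have e1 : ((if c = pvIdx g0.length u then [v] else []).map (pvIdx g0.length)).count c' =
        if pvIdx g0.length u = c ∧ pvIdx g0.length v = c' then 1 else 0 := by
      by_cases h : c = pvIdx g0.length u <;> by_cases h' : pvIdx g0.length v = c' <;>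
        simp [h, h', List.count_singleton, eq_comm]
    have e2 : ((if c = pvIdx g0.length v then [u] else []).map (pvIdx g0.length)).count c' =
        if pvIdx g0.length v = c ∧ pvIdx g0.length u = c' then 1 else 0 := by
      by_cases h : c = pvIdx g0.length v <;> by_cases h' : pvIdx g0.length u = c' <;>
        simp [h, h', List.count_singleton, eq_comm]
    have hP : pvP g0.length [u, v] c c' =
        ((if c = pvIdx g0.length u then [v] else []).map (pvIdx g0.length)).count c' +
        ((if c = pvIdx g0.length v then [u] else []).map (pvIdx g0.length)).count c' := by
      rw [e1, e2]
      rfl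
    omega
theorem pvCnAdd_char (ys : List Int) : ∀ (cn : List Int), (∀ y ∈ ys, pvInR cn.length y) →
    (pvCnAdd cn ys).length = cn.length ∧ ∀ c < cn.length,
      (pvCnAdd cn ys).getD c 0 = cn.getD c 0 + ((ys.map (pvIdx cn.length)).count c : Int) := by
  induction ys with
  | nil => intro cn _; exact ⟨rfl, fun c _ => by simp [pvCnAdd]⟩
  | cons y t ih =>
    intro cn hys
    have hy : pvInR cn.length y := hys y (by simp)
    have hstep : pvCnAdd cn (y :: t) =
        pvCnAdd (cn.set (pvIdx cn.length y) (cn.getD (pvIdx cn.length y) 0 + 1)) t := by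
      simp only [pvCnAdd, List.foldl_cons]
      rw [pvSetD_idx cn y _ hy, pvGetD_idx cn y 0 hy]
    set cn1 := cn.set (pvIdx cn.length y) (cn.getD (pvIdx cn.length y) 0 + 1) with hcn1
    have hl1 : cn1.length = cn.length := by simp [hcn1]
    obtain ⟨ihl, ihv⟩ := ih cn1 (by rw [hl1]; intro y' hy'; exact hys y' (by simp [hy']))
    rw [hstep]
    refine ⟨by rw [ihl, hl1], ?_⟩
    intro c hc
    rw [ihv c (by omega), hl1]
    have hset := pvGetD_set cn (pvIdx cn.length y) c (cn.getD (pvIdx cn.length y) 0 + 1) 0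
    rw [show cn1.getD c 0 = _ from hset]
    have hylt : pvIdx cn.length y < cn.length := pvIdx_lt hy
    by_cases hcy : c = pvIdx cn.length y
    · rw [if_pos ⟨hcy, hylt⟩]
      have hcount : ((y :: t).map (pvIdx cn.length)).count c =
          (t.map (pvIdx cn.length)).count c + 1 := by
        simp [List.count_cons, hcy]
      rw [hcount, hcy]
      push_cast
      ring
    · rw [if_neg (by tauto)]
      have hcount : ((y :: t).map (pvIdx cn.length)).count c =
          (t.map (pvIdx cn.length)).count c := by
        simp [List.count_cons, beq_iff_eq, Ne.symm hcy]
      rw [hcount]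

theorem pvCnSub_char (ys : List Int) : ∀ (cn : List Int), (∀ y ∈ ys, pvInR cn.length y) →
    (pvCnSub cn ys).length = cn.length ∧ ∀ c < cn.length,
      (pvCnSub cn ys).getD c 0 = cn.getD c 0 - ((ys.map (pvIdx cn.length)).count c : Int) := by
  induction ys with
  | nil => intro cn _; exact ⟨rfl, fun c _ => by simp [pvCnSub]⟩
  | cons y t ih =>
    intro cn hys
    have hy : pvInR cn.length y := hys y (by simp)
    have hstep : pvCnSub cn (y :: t) =
        pvCnSub (cn.set (pvIdx cn.length y) (cn.getD (pvIdx cn.length y) 0 - 1)) t := by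
      simp only [pvCnSub, List.foldl_cons]
      rw [pvSetD_idx cn y _ hy, pvGetD_idx cn y 0 hy]
    set cn1 := cn.set (pvIdx cn.length y) (cn.getD (pvIdx cn.length y) 0 - 1) with hcn1
    have hl1 : cn1.length = cn.length := by simp [hcn1]
    obtain ⟨ihl, ihv⟩ := ih cn1 (by rw [hl1]; intro y' hy'; exact hys y' (by simp [hy']))
    rw [hstep]
    refine ⟨by rw [ihl, hl1], ?_⟩
    intro c hc
    rw [ihv c (by omega), hl1]
    have hset := pvGetD_set cn (pvIdx cn.length y) c (cn.getD (pvIdx cn.length y) 0 - 1) 0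
    rw [show cn1.getD c 0 = _ from hset]
    have hylt : pvIdx cn.length y < cn.length := pvIdx_lt hy
    by_cases hcy : c = pvIdx cn.length y
    · rw [if_pos ⟨hcy, hylt⟩]
      have hcount : ((y :: t).map (pvIdx cn.length)).count c =
          (t.map (pvIdx cn.length)).count c + 1 := by
        simp [List.count_cons, hcy]
      rw [hcount, hcy]
      push_cast
      ring
    · rw [if_neg (by tauto)]
      have hcount : ((y :: t).map (pvIdx cn.length)).count c =
          (t.map (pvIdx cn.length)).count c := by
        simp [List.count_cons, beq_iff_eq, Ne.symm hcy]
      rw [hcount]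

-- ---- left-bound spec pvLS ----
theorem pvLS_le_iff (N : Nat) (pa : List Int) (foes : List (List Int)) (j : Nat) (c : Int) :
    pvLS N pa foes j ≤ c ↔ 0 ≤ c ∧ ∀ t < j,
      0 < pvPE N foes (pvCell N pa t) (pvCell N pa j) → (t : Int) + 1 ≤ c := by
  have aux : ∀ (l : List Nat) (a0 : Int),
      (l.foldl (fun a t => if 0 < pvPE N foes (pvCell N pa t) (pvCell N pa j)
        then max a ((t : Int) + 1) else a) a0) ≤ c ↔
      a0 ≤ c ∧ ∀ t ∈ l, 0 < pvPE N foes (pvCell N pa t) (pvCell N pa j) → (t : Int) + 1 ≤ c := by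
    intro l
    induction l with
    | nil => intro a0; simp
    | cons t ts ihl =>
      intro a0
      rw [List.foldl_cons, ihl]
      by_cases hp : 0 < pvPE N foes (pvCell N pa t) (pvCell N pa j)
      · rw [if_pos hp]
        constructor
        · rintro ⟨h1, h2⟩
          exact ⟨by omega, fun t' ht' => by
            rcases List.mem_cons.mp ht' with rfl | ht'
            · intro _; omega
            · exact h2 t' ht'⟩
        · rintro ⟨h1, h2⟩
          exact ⟨by have := h2 t (by simp) hp; omega, fun t' ht' => h2 t' (by simp [ht'])⟩
      · rw [if_neg hp]
        constructor
        · rintro ⟨h1, h2⟩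
          exact ⟨h1, fun t' ht' => by
            rcases List.mem_cons.mp ht' with rfl | ht'
            · intro h; exact absurd h hp
            · exact h2 t' ht'⟩
        · rintro ⟨h1, h2⟩
          exact ⟨h1, fun t' ht' => h2 t' (by simp [ht'])⟩
  rw [pvLS, aux]
  simp [List.mem_range]

theorem pvLS_nonneg (N : Nat) (pa : List Int) (foes : List (List Int)) (j : Nat) :
    0 ≤ pvLS N pa foes j := by
  have aux : ∀ (l : List Nat) (a0 : Int), a0 ≤
      (l.foldl (fun a t => if 0 < pvPE N foes (pvCell N pa t) (pvCell N pa j)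
        then max a ((t : Int) + 1) else a) a0) := by
    intro l
    induction l with
    | nil => intro a0; simp
    | cons t ts ihl =>
      intro a0
      rw [List.foldl_cons]
      refine le_trans ?_ (ihl _)
      split <;> simp
  exact aux _ 0

theorem pvLS_le_self (N : Nat) (pa : List Int) (foes : List (List Int)) (j : Nat) :
    pvLS N pa foes j ≤ (j : Int) := by
  rw [pvLS_le_iff]
  exact ⟨by positivity, fun t ht _ => by omega⟩

-- ---- window sums ----
theorem sum_map_natCast_eq_zero {α : Type} (l : List α) (h : α → Nat) :
    ((l.map fun a => (h a : Int)).sum = 0) ↔ ∀ a ∈ l, h a = 0 := by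
  induction l with
  | nil => simp
  | cons a t ih =>
    simp only [List.map_cons, List.sum_cons, List.mem_cons]
    constructor
    · intro H
      have h1 : 0 ≤ ((t.map fun a => (h a : Int)).sum) := by
        apply List.sum_nonneg
        intro x hx
        obtain ⟨b, _, rfl⟩ := List.mem_map.mp hx
        positivity
      have h2 : h a = 0 := by omega
      have h3 := ih.mp (by omega)
      rintro b (rfl | hb)
      · exact h2
      · exact h3 b hb
    · intro H
      rw [H a (Or.inl rfl), ih.mpr (fun b hb => H b (Or.inr hb))]
      simp

theorem pvWinS_cons (N : Nat) (pa : List Int) (foes : List (List Int)) (i j : Nat)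
    (hij : i < j) (c : Nat) : pvWinS N pa foes i j c =
      (pvPE N foes (pvCell N pa i) c : Int) + pvWinS N pa foes (i + 1) j c := by
  unfold pvWinS
  rw [show j - i = (j - (i + 1)) + 1 by omega, List.range'_succ, List.map_cons, List.sum_cons]

theorem pvWinS_concat (N : Nat) (pa : List Int) (foes : List (List Int)) (i j : Nat)
    (hij : i ≤ j) (c : Nat) : pvWinS N pa foes i (j + 1) c =
      pvWinS N pa foes i j c + (pvPE N foes (pvCell N pa j) c : Int) := by
  unfold pvWinS
  rw [show j + 1 - i = (j - i) + 1 by omega, List.range'_1_concat]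
  simp [show i + (j - i) = j by omega]

theorem pvWinS_empty (N : Nat) (pa : List Int) (foes : List (List Int)) (i j : Nat)
    (hij : j ≤ i) (c : Nat) : pvWinS N pa foes i j c = 0 := by
  unfold pvWinS
  rw [show j - i = 0 by omega]
  simp

theorem pvWinS_zero_iff (N : Nat) (pa : List Int) (foes : List (List Int)) (i j : Nat) :
    pvWinS N pa foes i j (pvCell N pa j) = 0 ↔ pvLS N pa foes j ≤ (i : Int) := by
  rw [pvWinS, sum_map_natCast_eq_zero, pvLS_le_iff]
  constructor
  · intro H
    refine ⟨by positivity, ?_⟩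
    intro t ht hpe
    by_cases hti : t < i
    · omega
    · exact absurd (H t (by rw [List.mem_range'_1]; omega)) (by omega)
  · rintro ⟨_, H⟩ t htm
    rw [List.mem_range'_1] at htm
    by_contra h
    have := H t (by omega) (by omega)
    omega

-- ---- the while loop ----
theorem pvShrink_spec (N : Nat) (pa : List Int) (foes : List (List Int))
    (g : List (List Int)) (hgl : g.length = N) (hpa : pvOkPa N pa)
    (hgv : ∀ c < N, ∀ y ∈ g.getD c [], pvInR N y)
    (hg : ∀ c < N, ∀ c' : Nat, ((g.getD c []).map (pvIdx N)).count c' = pvPE N foes c c') :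
    ∀ (fuel i j : Nat), i ≤ j → j < pa.length → j - i ≤ fuel → ∀ cn, pvINV N pa foes i j cn →
    ∃ cn', pvShrink g pa (pa.getD j 0) fuel (i : Int) cn =
      (max (i : Int) (pvLS N pa foes j), cn') ∧
      pvINV N pa foes (max i (pvLS N pa foes j).toNat) j cn' := by
  intro fuel
  induction fuel with
  | zero =>
    intro i j hij hj hfu cn hinv
    have hij' : i = j := by omega
    subst hij'
    have hle : pvLS N pa foes i ≤ (i : Int) := pvLS_le_self N pa foes i
    have h0 := pvLS_nonneg N pa foes i
    refine ⟨cn, ?_, ?_⟩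
    · rw [pvShrink, max_eq_left hle]
    · rw [show max i (pvLS N pa foes i).toNat = i by omega]
      exact hinv
  | succ fuel ih =>
    intro i j hij hj hfu cn hinv
    obtain ⟨hcl, hcv⟩ := hinv
    have hjmem : pa.getD j 0 ∈ pa := by
      rw [List.getD_eq_getElem _ _ hj]; exact List.getElem_mem hj
    have hjin : pvInR N (pa.getD j 0) := hpa _ hjmem
    have hread : PySem.List.pyGetD cn (pa.getD j 0) 0 = pvWinS N pa foes i j (pvCell N pa j) := by
      rw [pvGetD_idx cn _ 0 (by rw [hcl]; exact hjin), hcl]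
      exact hcv _ (pvIdx_lt hjin)
    rw [pvShrink]
    by_cases hz : pvWinS N pa foes i j (pvCell N pa j) = 0
    · rw [if_neg (by rw [hread]; simpa using hz)]
      have hle : pvLS N pa foes j ≤ (i : Int) := (pvWinS_zero_iff N pa foes i j).mp hz
      have h0 := pvLS_nonneg N pa foes j
      refine ⟨cn, by rw [max_eq_left hle], ?_⟩
      rw [show max i (pvLS N pa foes j).toNat = i by omega]
      exact ⟨hcl, hcv⟩
    · rw [if_pos (by rw [hread]; simpa using hz)]
      have hilt : i < j := by
        by_contra hc
        exact hz (pvWinS_empty N pa foes i j (by omega) _)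
      have hgt : ¬ pvLS N pa foes j ≤ (i : Int) := fun h =>
        hz ((pvWinS_zero_iff N pa foes i j).mpr h)
      have h0 := pvLS_nonneg N pa foes j
      have himem : pa.getD i 0 ∈ pa := by
        rw [List.getD_eq_getElem _ _ (by omega)]; exact List.getElem_mem (by omega)
      have hiin : pvInR N (pa.getD i 0) := hpa _ himem
      have hgread : PySem.List.pyGetD g (PySem.List.pyGetD pa (i : Int) 0) [] =
          g.getD (pvCell N pa i) [] := by
        rw [PySem.List.pyGetD_natCast, pvGetD_idx g _ [] (by rw [hgl]; exact hiin), hgl]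
        rfl
      have hcilt : pvCell N pa i < N := pvIdx_lt hiin
      obtain ⟨hsl, hsv⟩ := pvCnSub_char (g.getD (pvCell N pa i) []) cn
        (by rw [hcl]; exact hgv _ hcilt)
      have hinv' : pvINV N pa foes (i + 1) j (pvCnSub cn (g.getD (pvCell N pa i) [])) := by
        refine ⟨by rw [hsl, hcl], ?_⟩
        intro c hc
        rw [hsv c (by omega), hcl, hg _ hcilt c, hcv c hc,
          pvWinS_cons N pa foes i j hilt c]
        ring
      obtain ⟨cn', heq, hinv''⟩ := ih (i + 1) j (by omega) hj (by omega) _ hinv'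
      rw [hgread, show ((i : Int) + 1) = ((i + 1 : Nat) : Int) by push_cast; ring, heq]
      refine ⟨cn', ?_, ?_⟩
      · rw [show max ((i + 1 : Nat) : Int) (pvLS N pa foes j) = max (i : Int) (pvLS N pa foes j)
          by push_cast; omega]
      · rw [show max i (pvLS N pa foes j).toNat = max (i + 1) (pvLS N pa foes j).toNat by omega]
        exact hinv''

-- ---- shared state recursions ----
theorem pvI_nonneg (L : Nat → Int) (k : Nat) : 0 ≤ pvI L k := by
  induction k with
  | zero => simp [pvI]
  | succ k ih => exact le_trans ih (by simp [pvI])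

theorem pvI_le (L : Nat → Int) (hL : ∀ k : Nat, L k ≤ (k : Int)) (k : Nat) :
    pvI L k ≤ (k : Int) := by
  induction k with
  | zero => simp [pvI]
  | succ k ih =>
    simp only [pvI]
    have := hL k
    push_cast
    omega

-- ---- A main loop ----
theorem solveA_aux (N : Nat) (pa : List Int) (foes : List (List Int))
    (g : List (List Int)) (hgl : g.length = N) (hpa : pvOkPa N pa)
    (hgv : ∀ c < N, ∀ y ∈ g.getD c [], pvInR N y)
    (hg : ∀ c < N, ∀ c' : Nat, ((g.getD c []).map (pvIdx N)).count c' = pvPE N foes c c') :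
    ∀ k : Nat, k ≤ pa.length →
    ∃ cn, ((PySem.List.pyRange 0 (k : Int) 1).foldl
        (fun s j => pvStepA g pa s (j, PySem.List.pyGetD pa j 0)) (0, 0, List.replicate N 0)) =
      (pvAns (pvLS N pa foes) k, pvI (pvLS N pa foes) k, cn) ∧
      pvINV N pa foes (pvI (pvLS N pa foes) k).toNat k cn := by
  intro k
  induction k with
  | zero =>
    intro _
    rw [PySem.List.pyRange_one_eq_nil (by omega), List.foldl_nil]
    refine ⟨List.replicate N 0, rfl, by simp, ?_⟩
    intro c hc
    rw [pvWinS_empty N pa foes _ 0 (by omega) c]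
    simp
  | succ k ihk =>
    intro hk
    obtain ⟨cn, heq, hinv⟩ := ihk (by omega)
    rw [show ((k + 1 : Nat) : Int) = (k : Int) + 1 by push_cast; ring,
      PySem.List.pyRange_one_succ_right (by positivity), List.foldl_append, heq,
      List.foldl_cons, List.foldl_nil]
    set LS := pvLS N pa foes with hLS
    have hkl : k < pa.length := by omega
    have hIk : ((pvI LS k).toNat : Int) = pvI LS k := Int.toNat_of_nonneg (pvI_nonneg LS k)
    have hIle : (pvI LS k).toNat ≤ k := by
      have := pvI_le LS (fun j => pvLS_le_self N pa foes j) k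
      omega
    obtain ⟨cn', hsh, hinv'⟩ := pvShrink_spec N pa foes g hgl hpa hgv hg pa.length
      (pvI LS k).toNat k hIle hkl (by omega) cn hinv
    rw [hIk] at hsh
    have hL0 : 0 ≤ LS k := pvLS_nonneg N pa foes k
    have hLle : LS k ≤ (k : Int) := pvLS_le_self N pa foes k
    have hmaxN : max (pvI LS k).toNat (LS k).toNat = (pvI LS (k + 1)).toNat := by
      have := pvI_nonneg LS k
      simp only [pvI]
      omega
    unfold pvStepA
    simp only [PySem.List.pyGetD_natCast]
    rw [hsh]
    have hImax : max (pvI LS k) (LS k) = pvI LS (k + 1) := rfl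
    have hkmem : pa.getD k 0 ∈ pa := by
      rw [List.getD_eq_getElem _ _ hkl]; exact List.getElem_mem hkl
    have hkin : pvInR N (pa.getD k 0) := hpa _ hkmem
    have hgread : PySem.List.pyGetD g (pa.getD k 0) [] = g.getD (pvCell N pa k) [] := by
      rw [pvGetD_idx g _ [] (by rw [hgl]; exact hkin), hgl]
      rfl
    have hcklt : pvCell N pa k < N := pvIdx_lt hkin
    obtain ⟨hinvl, hinvv⟩ := hinv'
    rw [hmaxN] at hinvv
    obtain ⟨hal, hav⟩ := pvCnAdd_char (g.getD (pvCell N pa k) []) cn'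
      (by rw [hinvl]; exact hgv _ hcklt)
    have hI1le : (pvI LS (k + 1)).toNat ≤ k := by
      have := pvI_nonneg LS k
      simp only [pvI]
      omega
    refine ⟨pvCnAdd cn' (g.getD (pvCell N pa k) []), ?_, ?_, ?_⟩
    · show (pvAns LS k + (k : Int) - max (pvI LS k) (LS k) + 1, max (pvI LS k) (LS k),
        pvCnAdd cn' (PySem.List.pyGetD g (pa.getD k 0) [])) = _
      rw [hgread, hImax]
      refine congrArg (fun a => (a, pvI LS (k + 1),
        pvCnAdd cn' (g.getD (pvCell N pa k) []))) ?_
      rw [show pvAns LS (k + 1) = pvAns LS k + ((k : Int) - pvI LS (k + 1) + 1) from rfl]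
      ring
    · rw [hal, hinvl]
    · intro c hc
      rw [hav c (by omega), hinvl, hg _ hcklt c, hinvv c hc,
        pvWinS_concat N pa foes _ k hI1le c]

theorem solveA_eq (n m : Int) (pa : List Int) (foes : List (List Int)) (hn : 0 ≤ n)
    (hpa : pvOkPa (n + 1).toNat pa) (hfo : pvOkFoes (n + 1).toNat foes) :
    solve n m pa foes = pvAns (pvLS (n + 1).toNat pa foes) pa.length := by
  set N := (n + 1).toNat with hN
  obtain ⟨hgl, hgv, hgc⟩ := pvG_char foes (List.replicate N [])
    (by rw [List.length_replicate]; exact hfo) (by intro c hc y hy; simp at hy)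
  rw [List.length_replicate] at hgl hgv hgc
  have hg : ∀ c < N, ∀ c' : Nat,
      (((foes.foldl pvGStep (List.replicate N [])).getD c []).map (pvIdx N)).count c' =
        pvPE N foes c c' := by
    intro c hc c'
    rw [hgc c hc c']
    have : (List.replicate N ([] : List Int)).getD c [] = [] := by
      rcases Nat.lt_or_ge c N with h | h
      · rw [List.getD_eq_getElem _ _ (by simpa using h)]
        simp
      · rw [List.getD_eq_default _ _ (by simpa using h)]
    rw [this]
    simp [pvPE]
  show ((PySem.List.enumerate pa 0).foldl
      (pvStepA (foes.foldl pvGStep (List.replicate N [])) pa) (0, 0, List.replicate N 0)).1 = _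
  rw [PySem.List.enumerate_eq_map_pyRange (d := 0), List.foldl_map,
    show (PySem.List.len pa) = ((pa.length : Nat) : Int) from PySem.List.len_eq pa]
  obtain ⟨cn, heq, _⟩ := solveA_aux N pa foes _ hgl hpa hgv hg pa.length (le_refl _)
  rw [heq]

-- ---- B occurrence lists ----
theorem pvOcc_char (N : Nat) (pa : List Int) (hpa : pvOkPa N pa) :
    ((PySem.List.enumerate pa 0).foldl pvOccStep (List.replicate N [])).length = N ∧
    ∀ c < N, ((PySem.List.enumerate pa 0).foldl pvOccStep (List.replicate N [])).getD c [] =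
      pvPosL N pa c := by
  have aux : ∀ k : Nat, k ≤ pa.length →
      ((PySem.List.pyRange 0 (k : Int) 1).foldl
        (fun occ j => pvOccStep occ (j, PySem.List.pyGetD pa j 0)) (List.replicate N [])).length
        = N ∧
      ∀ c < N, ((PySem.List.pyRange 0 (k : Int) 1).foldl
        (fun occ j => pvOccStep occ (j, PySem.List.pyGetD pa j 0)) (List.replicate N [])).getD c []
        = ((List.range k).filter (fun t => pvCell N pa t = c)).map (fun (t : Nat) => (t : Int)) := by
    intro k
    induction k with
    | zero =>
      intro _
      rw [PySem.List.pyRange_one_eq_nil (by omega), List.foldl_nil]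
      exact ⟨by simp, fun c hc => by simp⟩
    | succ k ihk =>
      intro hk
      obtain ⟨ihl, ihv⟩ := ihk (by omega)
      rw [show ((k + 1 : Nat) : Int) = (k : Int) + 1 by push_cast; ring,
        PySem.List.pyRange_one_succ_right (by positivity), List.foldl_append,
        List.foldl_cons, List.foldl_nil]
      set occk := (PySem.List.pyRange 0 (k : Int) 1).foldl
        (fun occ j => pvOccStep occ (j, PySem.List.pyGetD pa j 0)) (List.replicate N [])
      have hkl : k < pa.length := by omega
      have hmem : pa.getD k 0 ∈ pa := by
        rw [List.getD_eq_getElem _ _ hkl]; exact List.getElem_mem hkl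
      have hin : pvInR N (pa.getD k 0) := hpa _ hmem
      have hin' : pvInR occk.length (pa.getD k 0) := by rw [ihl]; exact hin
      have hstep : pvOccStep occk ((k : Int), PySem.List.pyGetD pa (k : Int) 0) =
          occk.set (pvCell N pa k) (occk.getD (pvCell N pa k) [] ++ [(k : Int)]) := by
        unfold pvOccStep
        simp only [PySem.List.pyGetD_natCast]
        rw [pvGetD_idx _ _ [] hin', pvSetD_idx _ _ _ hin', ihl]
        rfl
      rw [hstep]
      refine ⟨by simp [ihl], ?_⟩
      intro c hc
      rw [pvGetD_set, List.range_succ, List.filter_append, List.map_append]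
      by_cases hck : c = pvCell N pa k
      · subst hck
        rw [if_pos ⟨rfl, by rw [ihl]; exact pvIdx_lt hin⟩, ihv _ hc]
        simp
      · rw [if_neg (by rw [ihl]; tauto), ihv c hc]
        have : (List.filter (fun t => decide (pvCell N pa t = c)) [k]) = [] := by
          simp [Ne.symm hck]
        simp only [this, List.map_nil, List.append_nil]
  rw [PySem.List.enumerate_eq_map_pyRange (d := 0), List.foldl_map,
    show (PySem.List.len pa) = ((pa.length : Nat) : Int) from PySem.List.len_eq pa]
  obtain ⟨h1, h2⟩ := aux pa.length (le_refl _)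
  refine ⟨h1, ?_⟩
  intro c hc
  rw [h2 c hc]
  rfl

theorem pvPosL_mem (N : Nat) (pa : List Int) (c : Nat) (q : Int) :
    q ∈ pvPosL N pa c ↔ ∃ t : Nat, t < pa.length ∧ pvCell N pa t = c ∧ q = (t : Int) := by
  unfold pvPosL
  simp only [List.mem_map, List.mem_filter, List.mem_range, decide_eq_true_eq]
  constructor
  · rintro ⟨t, ⟨ht, hc⟩, rfl⟩
    exact ⟨t, ht, hc, rfl⟩
  · rintro ⟨t, ht, hc, rfl⟩
    exact ⟨t, ⟨ht, hc⟩, rfl⟩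

-- ---- B limit table ----
theorem pvIdx_of_nonneg {N : Nat} {v : Int} (h : 0 ≤ v) : pvIdx N v = v.toNat := by
  unfold pvIdx
  split <;> omega

theorem pvPE_pos_iff (N : Nat) (foes : List (List Int)) (c c' : Nat) :
    0 < pvPE N foes c c' ↔ ∃ f ∈ foes, 0 < pvP N f c c' := by
  unfold pvPE
  induction foes with
  | nil => simp
  | cons f t ih =>
    simp only [List.map_cons, List.sum_cons, List.mem_cons]
    constructor
    · intro h
      rcases Nat.lt_or_ge 0 (pvP N f c c') with hf | hf
      · exact ⟨f, Or.inl rfl, hf⟩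
      · have : 0 < (t.map (fun f => pvP N f c c')).sum := by omega
        obtain ⟨f', hf', hp⟩ := ih.mp this
        exact ⟨f', Or.inr hf', hp⟩
    · rintro ⟨f', (rfl | hf'), hp⟩
      · omega
      · have := ih.mpr ⟨f', hf', hp⟩
        omega

theorem pvLimQ_char (r' : Int) (qs : List Int) : ∀ (lim : List Int),
    0 ≤ r' → r' < (lim.length : Int) →
    ((qs.foldl (fun lim q => if q < r' ∧ PySem.List.pyGetD lim r' 0 < q + 1
        then PySem.List.pySetD lim r' (q + 1) else lim) lim).length = lim.length ∧
     ∀ rr : Nat, rr < lim.length → ∀ c : Int,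
      ((qs.foldl (fun lim q => if q < r' ∧ PySem.List.pyGetD lim r' 0 < q + 1
        then PySem.List.pySetD lim r' (q + 1) else lim) lim).getD rr 0 ≤ c ↔
        (lim.getD rr 0 ≤ c ∧ (r' = (rr : Int) → ∀ q ∈ qs, q < r' → q + 1 ≤ c)))) := by
  induction qs with
  | nil => intro lim _ _; exact ⟨rfl, fun rr _ c => by simp⟩
  | cons q t ih =>
    intro lim h0 hlt
    have hbr : pvInR lim.length r' := ⟨by omega, hlt⟩
    have hread : PySem.List.pyGetD lim r' 0 = lim.getD r'.toNat 0 := by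
      rw [pvGetD_idx lim r' 0 hbr, pvIdx_of_nonneg h0]
    have hwrite : PySem.List.pySetD lim r' (q + 1) = lim.set r'.toNat (q + 1) := by
      rw [pvSetD_idx lim r' _ hbr, pvIdx_of_nonneg h0]
    have hstep : (if q < r' ∧ PySem.List.pyGetD lim r' 0 < q + 1
        then PySem.List.pySetD lim r' (q + 1) else lim) =
        if q < r' ∧ lim.getD r'.toNat 0 < q + 1 then lim.set r'.toNat (q + 1) else lim := by
      rw [hread, hwrite]
    have hl1 : ((if q < r' ∧ lim.getD r'.toNat 0 < q + 1
        then lim.set r'.toNat (q + 1) else lim)).length = lim.length := by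
      split <;> simp
    obtain ⟨ihl, ihv⟩ := ih (if q < r' ∧ lim.getD r'.toNat 0 < q + 1
        then lim.set r'.toNat (q + 1) else lim) h0 (by rw [hl1]; exact hlt)
    rw [List.foldl_cons, hstep]
    refine ⟨by rw [ihl, hl1], ?_⟩
    intro rr hrr c
    rw [ihv rr (by rw [hl1]; exact hrr) c]
    have hget : (if q < r' ∧ lim.getD r'.toNat 0 < q + 1
        then lim.set r'.toNat (q + 1) else lim).getD rr 0 =
        if r' = (rr : Int) ∧ q < r' ∧ lim.getD rr 0 < q + 1 then q + 1 else lim.getD rr 0 := by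
      by_cases he : r' = (rr : Int)
      · have ht : r'.toNat = rr := by omega
        rw [ht]
        by_cases a : q < r' ∧ lim.getD rr 0 < q + 1
        · rw [if_pos a, if_pos ⟨he, a⟩, pvGetD_set, if_pos ⟨rfl, hrr⟩]
        · rw [if_neg a, if_neg (by tauto)]
      · have ht : r'.toNat ≠ rr := by omega
        by_cases a : q < r' ∧ lim.getD r'.toNat 0 < q + 1
        · rw [if_pos a, if_neg (by tauto), pvGetD_set, if_neg (by tauto)]
        · rw [if_neg a, if_neg (by tauto)]
    rw [hget]
    simp only [List.forall_mem_cons]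
    by_cases he : r' = (rr : Int)
    · constructor
      · rintro ⟨h1, h2⟩
        have h2' := h2 he
        refine ⟨?_, fun _ => ⟨?_, h2'⟩⟩
        · by_cases a : q < r' ∧ lim.getD rr 0 < q + 1
          · rw [if_pos ⟨he, a⟩] at h1
            omega
          · rw [if_neg (by tauto)] at h1
            exact h1
        · intro hq
          by_cases hl : lim.getD rr 0 < q + 1
          · rw [if_pos ⟨he, hq, hl⟩] at h1
            omega
          · rw [if_neg (fun hh => hl hh.2.2)] at h1
            omega
      · rintro ⟨h1, h2⟩
        obtain ⟨hq1, hq2⟩ := h2 he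
        refine ⟨?_, fun _ => hq2⟩
        split_ifs with a
        · exact hq1 a.2.1
        · exact h1
    · constructor
      · rintro ⟨h1, h2⟩
        rw [if_neg (fun hh => he hh.1)] at h1
        exact ⟨h1, fun hh => absurd hh he⟩
      · rintro ⟨h1, h2⟩
        rw [if_neg (fun hh => he hh.1)]
        exact ⟨h1, fun hh => absurd hh he⟩

theorem pvLimPair_char (occ : List (List Int)) (a b : Int) (rs qs : List Int)
    (hra : PySem.List.pyGetD occ a [] = qs) (hrb : PySem.List.pyGetD occ b [] = rs) :
    ∀ (lim : List Int), (∀ r' ∈ rs, 0 ≤ r' ∧ r' < (lim.length : Int)) →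
    ((pvLimPair occ lim a b).length = lim.length ∧
     ∀ rr : Nat, rr < lim.length → ∀ c : Int,
      ((pvLimPair occ lim a b).getD rr 0 ≤ c ↔
        (lim.getD rr 0 ≤ c ∧ ∀ r' ∈ rs, r' = (rr : Int) → ∀ q ∈ qs, q < r' → q + 1 ≤ c))) := by
  unfold pvLimPair
  rw [hra, hrb]
  clear hra hrb
  induction rs with
  | nil => intro lim _; exact ⟨rfl, fun rr _ c => by simp⟩
  | cons r' t ih =>
    intro lim hrs
    obtain ⟨hr0, hrl⟩ := hrs r' (by simp)
    rw [List.foldl_cons]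
    obtain ⟨ql, qv⟩ := pvLimQ_char r' qs lim hr0 hrl
    obtain ⟨ihl, ihv⟩ := ih _ (by rw [ql]; intro r'' hr''; exact hrs r'' (by simp [hr'']))
    rw [ql] at ihl ihv
    refine ⟨by rw [ihl], ?_⟩
    intro rr hrr c
    rw [ihv rr hrr c, qv rr hrr c]
    simp only [List.forall_mem_cons]
    constructor
    · rintro ⟨⟨h1, h2⟩, h3⟩
      exact ⟨h1, h2, h3⟩
    · rintro ⟨h1, h2, h3⟩
      exact ⟨⟨h1, h2⟩, h3⟩

theorem pvLimit_getD (N : Nat) (pa : List Int) (foes : List (List Int)) (occ : List (List Int))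
    (hol : occ.length = N) (hoc : ∀ c < N, occ.getD c [] = pvPosL N pa c)
    (hpa : pvOkPa N pa) (hfo : pvOkFoes N foes) :
    (foes.foldl (pvLimStep occ) (List.replicate pa.length 0)).length = pa.length ∧
    ∀ r < pa.length,
      (foes.foldl (pvLimStep occ) (List.replicate pa.length 0)).getD r 0 = pvLS N pa foes r := by
  have hocc : ∀ w : Int, pvInR N w → PySem.List.pyGetD occ w [] = pvPosL N pa (pvIdx N w) := by
    intro w hw
    rw [pvGetD_idx occ w [] (by rw [hol]; exact hw), hol]
    exact hoc _ (pvIdx_lt hw)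
  have hposrange : ∀ (cc : Nat) (r' : Int), r' ∈ pvPosL N pa cc →
      0 ≤ r' ∧ r' < (pa.length : Int) := by
    intro cc r' hr'
    obtain ⟨t, ht, _, rfl⟩ := (pvPosL_mem N pa cc r').mp hr'
    omega
  -- per-pair condition in pvP form
  have hfold : ∀ (fs : List (List Int)), pvOkFoes N fs → ∀ (lim : List Int),
      lim.length = pa.length →
      ((fs.foldl (pvLimStep occ) lim).length = lim.length ∧
       ∀ rr : Nat, rr < pa.length → ∀ c : Int,
        ((fs.foldl (pvLimStep occ) lim).getD rr 0 ≤ c ↔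
          (lim.getD rr 0 ≤ c ∧ ∀ f ∈ fs, ∀ t : Nat, t < pa.length → t < rr →
            0 < pvP N f (pvCell N pa t) (pvCell N pa rr) → (t : Int) + 1 ≤ c))) := by
    intro fs
    induction fs with
    | nil => intro _ lim _; exact ⟨rfl, fun rr _ c => by simp⟩
    | cons f fs2 ih =>
      intro hok lim hll
      obtain ⟨u, v, rfl, hu, hv⟩ := hok f (by simp)
      have hstep : pvLimStep occ lim [u, v] = pvLimPair occ (pvLimPair occ lim u v) v u := by
        unfold pvLimStep
        rfl
      obtain ⟨p1l, p1v⟩ := pvLimPair_char occ u v (pvPosL N pa (pvIdx N v))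
        (pvPosL N pa (pvIdx N u)) (hocc u hu) (hocc v hv) lim
        (by intro r' hr'; rw [hll]; exact hposrange _ r' hr')
      obtain ⟨p2l, p2v⟩ := pvLimPair_char occ v u (pvPosL N pa (pvIdx N u))
        (pvPosL N pa (pvIdx N v)) (hocc v hv) (hocc u hu) (pvLimPair occ lim u v)
        (by intro r' hr'; rw [p1l, hll]; exact hposrange _ r' hr')
      obtain ⟨ihl, ihv⟩ := ih (fun f hf => hok f (by simp [hf]))
        (pvLimPair occ (pvLimPair occ lim u v) v u) (by rw [p2l, p1l, hll])
      rw [List.foldl_cons, hstep]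
      refine ⟨by rw [ihl, p2l, p1l], ?_⟩
      intro rr hrr c
      rw [ihv rr hrr c, p2v rr (by rw [p1l, hll]; exact hrr) c, p1v rr (by rw [hll]; exact hrr) c]
      simp only [List.forall_mem_cons]
      have hcond : ((∀ r' ∈ pvPosL N pa (pvIdx N v), r' = (rr : Int) →
            ∀ q ∈ pvPosL N pa (pvIdx N u), q < r' → q + 1 ≤ c) ∧
          (∀ r' ∈ pvPosL N pa (pvIdx N u), r' = (rr : Int) →
            ∀ q ∈ pvPosL N pa (pvIdx N v), q < r' → q + 1 ≤ c)) ↔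
          (∀ t : Nat, t < pa.length → t < rr →
            0 < pvP N [u, v] (pvCell N pa t) (pvCell N pa rr) → (t : Int) + 1 ≤ c) := by
        constructor
        · rintro ⟨h1, h2⟩ t htl htr hp
          have hrrl : rr < pa.length := hrr
          unfold pvP at hp
          by_cases c1 : pvIdx N u = pvCell N pa t ∧ pvIdx N v = pvCell N pa rr
          · exact h1 (rr : Int) ((pvPosL_mem _ _ _ _).mpr ⟨rr, hrrl, c1.2.symm, rfl⟩) rfl
              (t : Int) ((pvPosL_mem _ _ _ _).mpr ⟨t, htl, c1.1.symm, rfl⟩) (by omega)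
          · have c2 : pvIdx N v = pvCell N pa t ∧ pvIdx N u = pvCell N pa rr := by
              by_contra c2
              simp only [if_neg c1, if_neg c2] at hp
              omega
            exact h2 (rr : Int) ((pvPosL_mem _ _ _ _).mpr ⟨rr, hrrl, c2.2.symm, rfl⟩) rfl
              (t : Int) ((pvPosL_mem _ _ _ _).mpr ⟨t, htl, c2.1.symm, rfl⟩) (by omega)
        · intro h
          constructor
          · rintro r' hr' rfl q hq hlt
            obtain ⟨t2, ht2, hc2, he2⟩ := (pvPosL_mem _ _ _ _).mp hr'
            obtain ⟨t1, ht1, hc1, rfl⟩ := (pvPosL_mem _ _ _ _).mp hq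
            have ht2e : t2 = rr := by omega
            rw [ht2e] at hc2
            refine h t1 ht1 (by omega) ?_
            have h5 : (if pvIdx N u = pvCell N pa t1 ∧ pvIdx N v = pvCell N pa rr
                then 1 else 0) = 1 := if_pos ⟨hc1.symm, hc2.symm⟩
            show 0 < (if pvIdx N u = pvCell N pa t1 ∧ pvIdx N v = pvCell N pa rr
                then 1 else 0) + (if pvIdx N v = pvCell N pa t1 ∧ pvIdx N u = pvCell N pa rr
                then 1 else 0)
            rw [h5]
            exact Nat.lt_of_lt_of_le Nat.one_pos (Nat.le_add_right 1 _)
          · rintro r' hr' rfl q hq hlt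
            obtain ⟨t2, ht2, hc2, he2⟩ := (pvPosL_mem _ _ _ _).mp hr'
            obtain ⟨t1, ht1, hc1, rfl⟩ := (pvPosL_mem _ _ _ _).mp hq
            have ht2e : t2 = rr := by omega
            rw [ht2e] at hc2
            refine h t1 ht1 (by omega) ?_
            have h5 : (if pvIdx N v = pvCell N pa t1 ∧ pvIdx N u = pvCell N pa rr
                then 1 else 0) = 1 := if_pos ⟨hc1.symm, hc2.symm⟩
            show 0 < (if pvIdx N u = pvCell N pa t1 ∧ pvIdx N v = pvCell N pa rr
                then 1 else 0) + (if pvIdx N v = pvCell N pa t1 ∧ pvIdx N u = pvCell N pa rr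
                then 1 else 0)
            rw [h5]
            exact Nat.lt_of_lt_of_le Nat.one_pos (Nat.le_add_left 1 _)
      constructor
      · rintro ⟨⟨⟨h1, hC1⟩, hC2⟩, hrest⟩
        exact ⟨h1, hcond.mp ⟨hC1, hC2⟩, hrest⟩
      · rintro ⟨h1, hCp, hrest⟩
        obtain ⟨hC1, hC2⟩ := hcond.mpr hCp
        exact ⟨⟨⟨h1, hC1⟩, hC2⟩, hrest⟩
  obtain ⟨hfl, hfv⟩ := hfold foes hfo (List.replicate pa.length 0) (by simp)
  have hbase : ∀ rr : Nat, (List.replicate pa.length (0 : Int)).getD rr 0 = 0 := by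
    intro rr
    rcases Nat.lt_or_ge rr pa.length with h | h
    · rw [List.getD_eq_getElem _ _ (by simpa using h)]; simp
    · rw [List.getD_eq_default _ _ (by simpa using h)]
  refine ⟨by rw [hfl]; simp, ?_⟩
  intro r hr
  have hx : ∀ c : Int, (foes.foldl (pvLimStep occ) (List.replicate pa.length 0)).getD r 0 ≤ c ↔
      (0 ≤ c ∧ ∀ t : Nat, t < r → 0 < pvPE N foes (pvCell N pa t) (pvCell N pa r) →
        (t : Int) + 1 ≤ c) := by
    intro c
    rw [hfv r hr c, hbase r]
    constructor
    · rintro ⟨h1, h2⟩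
      refine ⟨h1, ?_⟩
      intro t htr hpe
      obtain ⟨f, hf, hp⟩ := (pvPE_pos_iff N foes _ _).mp hpe
      exact h2 f hf t (by omega) htr hp
    · rintro ⟨h1, h2⟩
      refine ⟨h1, ?_⟩
      intro f hf t htl htr hp
      exact h2 t htr ((pvPE_pos_iff N foes _ _).mpr ⟨f, hf, hp⟩)
  have hy : ∀ c : Int, pvLS N pa foes r ≤ c ↔
      (0 ≤ c ∧ ∀ t : Nat, t < r → 0 < pvPE N foes (pvCell N pa t) (pvCell N pa r) →
        (t : Int) + 1 ≤ c) := fun c => pvLS_le_iff N pa foes r c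
  have h1 := (hx ((foes.foldl (pvLimStep occ) (List.replicate pa.length 0)).getD r 0)).mp
    (le_refl _)
  have h2 := (hy (pvLS N pa foes r)).mp (le_refl _)
  have h3 := (hy _).mpr h1
  have h4 := (hx _).mpr h2
  omega

-- ---- B main loop ----
theorem solveB_aux (limit : List Int) (LSf : Nat → Int)
    (hlim : ∀ k : Nat, (k : Int) < limit.length → PySem.List.pyGetD limit (k : Int) 0 = LSf k) :
    ∀ k : Nat, k ≤ limit.length →
    ((PySem.List.pyRange 0 (k : Int) 1).foldl (pvStepB limit) (0, 0)) = (pvAns LSf k, pvI LSf k) := by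
  intro k
  induction k with
  | zero => intro _; rw [PySem.List.pyRange_one_eq_nil (by omega)]; rfl
  | succ k ih =>
    intro hk
    rw [show ((k + 1 : Nat) : Int) = (k : Int) + 1 by push_cast; ring,
      PySem.List.pyRange_one_succ_right (by positivity), List.foldl_append, ih (by omega),
      List.foldl_cons, List.foldl_nil]
    unfold pvStepB
    rw [hlim k (by push_cast; omega)]
    have hcur : (if pvI LSf k < LSf k then LSf k else pvI LSf k) = pvI LSf (k + 1) := by
      simp only [pvI]
      split <;> omega
    simp only [hcur]
    show (pvAns LSf k + (k : Int) - pvI LSf (k + 1) + 1, pvI LSf (k + 1)) = _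
    rw [show pvAns LSf (k + 1) = pvAns LSf k + ((k : Int) - pvI LSf (k + 1) + 1) from rfl]
    refine congrArg (fun a => (a, pvI LSf (k + 1))) ?_
    ring

theorem solveB_eq (n m : Int) (pa : List Int) (foes : List (List Int)) (hn : 0 ≤ n)
    (hpa : pvOkPa (n + 1).toNat pa) (hfo : pvOkFoes (n + 1).toNat foes) :
    solve_alt n m pa foes = pvAns (pvLS (n + 1).toNat pa foes) pa.length := by
  set N := (n + 1).toNat with hN
  obtain ⟨hol, hoc⟩ := pvOcc_char N pa hpa
  obtain ⟨hll, hlv⟩ := pvLimit_getD N pa foes _ hol hoc hpa hfo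
  show ((PySem.List.pyRange 0 (PySem.List.len pa) 1).foldl
    (pvStepB (foes.foldl (pvLimStep ((PySem.List.enumerate pa 0).foldl pvOccStep
      (List.replicate N []))) (List.replicate pa.length 0))) (0, 0)).1 = _
  rw [show (PySem.List.len pa) = ((pa.length : Nat) : Int) from PySem.List.len_eq pa]
  rw [solveB_aux _ (pvLS N pa foes) ?_ pa.length (by rw [hll])]
  · intro k hkl
    rw [hll] at hkl
    rw [PySem.List.pyGetD_natCast]
    exact hlv k (by exact_mod_cast hkl)

-- ===== VERDICT (by name: the statement is the Claim_ definition above) =====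
theorem solve_spec : Claim_equal_solve := by
  intro n m pa foes _hDom hPre
  obtain ⟨hpa, hfo⟩ := hPre
  show solve n m pa foes = solve_alt n m pa foes
  by_cases hn : 0 ≤ n
  · have hN : ((n + 1).toNat : Int) = n + 1 := by omega
    have hpa' : pvOkPa (n + 1).toNat pa := fun p hp => by
      have := hpa p hp; unfold pvInR; omega
    have hfo' : pvOkFoes (n + 1).toNat foes := by
      intro f hf
      obtain ⟨hlen, hmem⟩ := hfo f hf
      rcases f with _ | ⟨a, _ | ⟨b, _ | ⟨c, t⟩⟩⟩ <;> simp at hlen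
      refine ⟨a, b, rfl, ?_, ?_⟩
      · have := hmem a (by simp); unfold pvInR; omega
      · have := hmem b (by simp); unfold pvInR; omega
    rw [solveA_eq n m pa foes hn hpa' hfo', solveB_eq n m pa foes hn hpa' hfo']
  · -- n < 0: the bounds -(n+1) ≤ v ≤ n are unsatisfiable, so pa and foes are empty
    have hpae : pa = [] := by
      cases pa with
      | nil => rfl
      | cons p t => exact absurd (hpa p (by simp)) (by omega)
    have hfoe : foes = [] := by
      cases foes with
      | nil => rfl
      | cons f t =>
        obtain ⟨hlen, hmem⟩ := hfo f (by simp)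
        rcases f with _ | ⟨a, r⟩
        · simp at hlen
        · exact absurd (hmem a (by simp)) (by omega)
    subst hpae hfoe
    rfl
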